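-- pv_equiv track=rewrite | github.com/cassidypignatello/bali-renovation-os | backend/app/utils/affiliate.py | _is_valid_tokopedia_hostname
-- ===== SOURCE A (Python) =====
-- TOKOPEDIA_DOMAINS = frozenset({"tokopedia.com", "tokopedia.co.id"})
--
-- def _is_valid_tokopedia_hostname(hostname: str | None) -> bool:
--     """
--     Check if hostname is a valid Tokopedia domain or subdomain.
--
--     Args:
--         hostname: The hostname to validate (e.g., 'www.tokopedia.com')
--
--     Returns:
--         True if hostname is tokopedia.com, tokopedia.co.id, or a subdomain thereof
--     """
--     if not hostname:
--         return False
--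
--     hostname = hostname.lower()
--
--     for domain in TOKOPEDIA_DOMAINS:
--         if hostname == domain or hostname.endswith(f".{domain}"):
--             return True
--
--     return False
-- ===== SOURCE B (Python) =====
-- def _is_valid_tokopedia_hostname(hostname):
--     if not hostname:
--         return False
--     parts = hostname.lower().split(".")
--     return (".".join(parts[-2:]) == "tokopedia.com"
--             or ".".join(parts[-3:]) == "tokopedia.co.id")
-- ===== Notes on version B (the rewrite author's own statement) =====
-- stated objective: alternative
-- what changed: B replaces A's loop of endswith-suffix tests against a frozenset by splitting the hostname into dot-separated labels once and comparing the joined trailing 2 (resp. 3) labels to the literal domains.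
import Mathlib
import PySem

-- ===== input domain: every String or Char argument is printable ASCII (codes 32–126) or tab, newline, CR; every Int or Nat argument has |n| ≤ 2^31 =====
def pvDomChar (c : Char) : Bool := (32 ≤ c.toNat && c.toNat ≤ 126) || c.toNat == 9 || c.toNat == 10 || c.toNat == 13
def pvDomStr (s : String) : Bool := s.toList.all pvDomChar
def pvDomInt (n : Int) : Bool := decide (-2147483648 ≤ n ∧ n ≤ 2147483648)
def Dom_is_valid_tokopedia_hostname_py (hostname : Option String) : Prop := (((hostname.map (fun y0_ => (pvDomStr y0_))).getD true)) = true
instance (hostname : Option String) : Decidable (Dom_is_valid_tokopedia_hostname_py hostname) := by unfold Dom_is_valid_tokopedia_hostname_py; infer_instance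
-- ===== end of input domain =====

-- B replaces A's endswith-over-a-frozenset loop by one split into labels plus comparison of the
-- joined trailing 2 (resp. 3) labels against the literal domains; alternative decomposition, same cost.

-- ===== PORT A =====
-- the frozenset TOKOPEDIA_DOMAINS, iterated; its iteration order does not affect the OR-result
def is_valid_tokopedia_hostname_py (hostname : Option String) : Bool :=
  match hostname with
  | none => false
  | some s =>
    if s == "" then false
    else
      let h := PySem.Str.lower s
      -- for domain in TOKOPEDIA_DOMAINS: if h == domain or h.endswith("." + domain): return True
      ["tokopedia.com", "tokopedia.co.id"].any (fun domain =>
        h == domain || PySem.Str.endswith h ("." ++ domain))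

-- ===== PORT B =====
def is_valid_tokopedia_hostname_py_alt (hostname : Option String) : Bool :=
  match hostname with
  | none => false
  | some s =>
    if s == "" then false
    else
      -- parts = hostname.lower().split(".")  (split? is some: the separator "." is nonempty)
      let parts := (PySem.Str.split? (PySem.Str.lower s) ".").getD []
      PySem.Str.join "." (PySem.List.slice parts (some (-2)) none) == "tokopedia.com" ||
      PySem.Str.join "." (PySem.List.slice parts (some (-3)) none) == "tokopedia.co.id"

-- ===== PRECONDITION & SPEC =====
def Spec_is_valid_tokopedia_hostname_py (hostname : Option String) (out : Bool) : Prop := out = is_valid_tokopedia_hostname_py_alt hostname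
instance (hostname : Option String) (out : Bool) : Decidable (Spec_is_valid_tokopedia_hostname_py hostname out) := by unfold Spec_is_valid_tokopedia_hostname_py; infer_instance

-- ===== CLAIM (what is proved, stated in full; the proofs are below) =====
def Claim_equal_is_valid_tokopedia_hostname_py : Prop := ∀ (hostname : Option String), Dom_is_valid_tokopedia_hostname_py hostname → Spec_is_valid_tokopedia_hostname_py hostname (is_valid_tokopedia_hostname_py hostname)

-- ===== LEMMAS AND PROOFS =====

-- a structural model of Python's str.split(".") on char lists
def pvConsHead (c : Char) : List (List Char) → List (List Char)
  | [] => [[c]]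
  | p :: ps => (c :: p) :: ps

def pvDsplit : List Char → List (List Char)
  | [] => [[]]
  | c :: rest => if c = '.' then [] :: pvDsplit rest else pvConsHead c (pvDsplit rest)

def pvGlue (x : List Char) : List (List Char) → List (List Char)
  | [] => [x]
  | p :: ps => (x ++ p) :: ps

lemma pvDsplit_ne_nil (l : List Char) : pvDsplit l ≠ [] := by
  cases l with
  | nil => simp [pvDsplit]
  | cons c rest =>
    simp only [pvDsplit]
    split
    · simp
    · cases h : pvDsplit rest <;> simp [pvConsHead]

lemma pvGlue_nil {ps : List (List Char)} (h : ps ≠ []) : pvGlue [] ps = ps := by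
  cases ps with
  | nil => exact absurd rfl h
  | cons p ps => simp [pvGlue]

lemma pvGlue_consHead (x : List Char) (c : Char) (ps : List (List Char)) :
    pvGlue (x ++ [c]) ps = pvGlue x (pvConsHead c ps) := by
  cases ps <;> simp [pvGlue, pvConsHead]

lemma pvGo_spec : ∀ (fuel : Nat) (l cur : List Char) (acc : List (List Char)),
    l.length ≤ fuel →
    PySem.Chars.splitOn.go ['.'] fuel l cur acc = acc.reverse ++ pvGlue cur.reverse (pvDsplit l) := by
  intro fuel
  induction fuel with
  | zero =>
    intro l cur acc h
    have hl : l = [] := List.eq_nil_of_length_eq_zero (Nat.le_zero.mp h)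
    subst hl
    simp [PySem.Chars.splitOn.go, pvDsplit, pvGlue]
  | succ fuel ih =>
    intro l cur acc h
    cases l with
    | nil => simp [PySem.Chars.splitOn.go, pvDsplit, pvGlue]
    | cons c rest =>
      rw [PySem.Chars.splitOn.go]
      by_cases hc : c = '.'
      · subst hc
        have hpre : ['.'].isPrefixOf ('.' :: rest) = true := by simp [List.isPrefixOf]
        rw [if_pos hpre]
        simp only [List.length_cons, List.length_nil, List.drop_succ_cons, List.drop_zero]
        rw [ih rest [] (cur.reverse :: acc) (by simpa using Nat.lt_succ_iff.mp (by simpa using h))]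
        simp only [List.reverse_nil]
        rw [pvGlue_nil (pvDsplit_ne_nil rest)]
        simp [pvDsplit, pvGlue]
      · have hpre : ['.'].isPrefixOf (c :: rest) = false := by
          simp [List.isPrefixOf]
          intro hcc; exact absurd hcc.symm hc
        rw [if_neg (by simp [hpre])]
        rw [ih rest (c :: cur) acc (by simpa using Nat.lt_succ_iff.mp (by simpa using h))]
        simp only [List.reverse_cons]
        rw [pvGlue_consHead]
        simp [pvDsplit, hc]

lemma pvSplitOn_eq (l : List Char) : PySem.Chars.splitOn l ['.'] = pvDsplit l := by
  unfold PySem.Chars.splitOn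
  rw [pvGo_spec (l.length + 1) l [] [] (by omega)]
  simp [pvGlue_nil (pvDsplit_ne_nil l)]

lemma pvJoin_dsplit (l : List Char) : PySem.Chars.join ['.'] (pvDsplit l) = l := by
  induction l with
  | nil => simp [pvDsplit, PySem.Chars.join, List.intercalate]
  | cons c rest ih =>
    simp only [pvDsplit]
    by_cases hc : c = '.'
    · subst hc
      rw [if_pos rfl]
      obtain ⟨p, ps, hps⟩ := List.exists_cons_of_ne_nil (pvDsplit_ne_nil rest)
      rw [hps] at ih ⊢
      simp [PySem.Chars.join, List.intercalate] at ih ⊢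
      simpa using ih
    · rw [if_neg hc]
      obtain ⟨p, ps, hps⟩ := List.exists_cons_of_ne_nil (pvDsplit_ne_nil rest)
      rw [hps] at ih ⊢
      cases ps with
      | nil => simpa [pvConsHead, PySem.Chars.join, List.intercalate] using ih
      | cons q qs =>
        simp [pvConsHead, PySem.Chars.join, List.intercalate] at ih ⊢
        simpa using ih

lemma pvDsplit_append (a b : List Char) :
    pvDsplit (a ++ '.' :: b) = pvDsplit a ++ pvDsplit b := by
  induction a with
  | nil => simp [pvDsplit]
  | cons c a ih =>
    by_cases hc : c = '.'
    · subst hc; simp [pvDsplit, ih]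
    · simp only [List.cons_append, pvDsplit, if_neg hc, ih]
      obtain ⟨p, ps, hps⟩ := List.exists_cons_of_ne_nil (pvDsplit_ne_nil a)
      rw [hps]
      simp [pvConsHead]

lemma pvJoin_append (X S : List (List Char)) (hX : X ≠ []) (hS : S ≠ []) :
    PySem.Chars.join ['.'] (X ++ S) = PySem.Chars.join ['.'] X ++ '.' :: PySem.Chars.join ['.'] S := by
  induction X with
  | nil => exact absurd rfl hX
  | cons x X ih =>
    cases X with
    | nil =>
      obtain ⟨s, ss, hss⟩ := List.exists_cons_of_ne_nil hS
      subst hss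
      simp [PySem.Chars.join, List.intercalate]
    | cons y Y =>
      have := ih (by simp)
      simp only [List.cons_append] at this ⊢
      simp [PySem.Chars.join, List.intercalate] at this ⊢
      simp [this]

lemma pvKey (l D : List Char) (k : Nat) (hk : 1 ≤ k) (hD : (pvDsplit D).length = k) :
    (PySem.Chars.join ['.'] ((pvDsplit l).drop ((pvDsplit l).length - k)) = D)
      ↔ (l = D ∨ ('.' :: D) <:+ l) := by
  constructor
  · intro h
    by_cases hn : (pvDsplit l).length ≤ k
    · left
      have h0 : (pvDsplit l).length - k = 0 := by omega
      rw [h0, List.drop_zero, pvJoin_dsplit] at h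
      exact h
    · right
      set P := pvDsplit l with hP
      have hsplit : P.take (P.length - k) ++ P.drop (P.length - k) = P := List.take_append_drop _ _
      have hXne : P.take (P.length - k) ≠ [] := by
        intro hcon
        have := congrArg List.length hcon
        simp at this
        omega
      have hSne : P.drop (P.length - k) ≠ [] := by
        intro hcon
        have := congrArg List.length hcon
        simp at this
        omega
      have hjoin := pvJoin_append (P.take (P.length - k)) (P.drop (P.length - k)) hXne hSne
      rw [hsplit] at hjoin
      have hl : PySem.Chars.join ['.'] P = l := pvJoin_dsplit l
      rw [h] at hjoin
      exact ⟨PySem.Chars.join ['.'] (P.take (P.length - k)), by rw [← hl, hjoin]⟩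
  · rintro (rfl | ⟨a, ha⟩)
    · rw [hD]
      simp [pvJoin_dsplit]
    · have ha' : l = a ++ '.' :: D := ha.symm
      subst ha'
      rw [pvDsplit_append]
      have hlen : (pvDsplit a ++ pvDsplit D).length = (pvDsplit a).length + k := by
        simp [hD]
      rw [hlen]
      have : (pvDsplit a).length + k - k = (pvDsplit a).length := by omega
      rw [this, List.drop_left' rfl, pvJoin_dsplit]

lemma pvStrEq_iff (s t : String) : (s = t) ↔ s.toList = t.toList := by
  constructor
  · exact congrArg _
  · intro hteq
    exact String.toList_injective hteq

-- ===== VERDICT (by name: the statement is the Claim_ definition above) =====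
theorem is_valid_tokopedia_hostname_py_spec : Claim_equal_is_valid_tokopedia_hostname_py := by
  intro hostname _
  unfold Spec_is_valid_tokopedia_hostname_py
  cases hostname with
  | none => rfl
  | some s =>
    by_cases hs : s = ""
    · subst hs; rfl
    · simp only [is_valid_tokopedia_hostname_py, is_valid_tokopedia_hostname_py_alt]
      set h := PySem.Str.lower s with hh
      -- B's parts, moved to char lists
      have hsplit : (PySem.Str.split? h ".").map (List.map String.toList)
          = some (pvDsplit h.toList) := by
        rw [PySem.Str.split?_map]
        have : (".".toList : List Char) = ['.'] := by decide
        rw [this]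
        simp [PySem.Chars.split?, pvSplitOn_eq]
      obtain ⟨ps, hps, hmap⟩ : ∃ ps, PySem.Str.split? h "." = some ps ∧
          ps.map String.toList = pvDsplit h.toList := by
        cases hq : PySem.Str.split? h "." with
        | none => rw [hq] at hsplit; simp at hsplit
        | some ps => rw [hq] at hsplit; exact ⟨ps, rfl, by simpa using hsplit⟩
      rw [hps]
      rw [Bool.eq_iff_iff]
      have hlen : ps.length = (pvDsplit h.toList).length := by
        rw [← hmap]; simp
      have hslice2 : PySem.List.slice ps (some (-2)) none = ps.drop (ps.length - 2) :=
        PySem.List.slice_from_neg_ofNat ps 2 (by omega)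
      have hslice3 : PySem.List.slice ps (some (-3)) none = ps.drop (ps.length - 3) :=
        PySem.List.slice_from_neg_ofNat ps 3 (by omega)
      have hjoin : ∀ k : Nat, (PySem.Str.join "." (ps.drop (ps.length - k))).toList
          = PySem.Chars.join ['.'] ((pvDsplit h.toList).drop ((pvDsplit h.toList).length - k)) := by
        intro k
        rw [PySem.Str.toList_join]
        have : (".".toList : List Char) = ['.'] := by decide
        rw [this, List.map_drop, hmap, hlen]
      simp only [Option.getD_some, hslice2, hslice3, beq_iff_eq,
        List.any_cons, List.any_nil, Bool.or_false]
      rw [if_neg hs, if_neg hs]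
      simp only [Bool.or_eq_true, beq_iff_eq]
      rw [pvStrEq_iff (PySem.Str.join "." (ps.drop (ps.length - 2))) "tokopedia.com",
          pvStrEq_iff (PySem.Str.join "." (ps.drop (ps.length - 3))) "tokopedia.co.id",
          hjoin 2, hjoin 3]
      rw [pvKey h.toList "tokopedia.com".toList 2 (by omega) (by decide),
          pvKey h.toList "tokopedia.co.id".toList 3 (by omega) (by decide)]
      rw [pvStrEq_iff h "tokopedia.com", pvStrEq_iff h "tokopedia.co.id"]
      have he1 : PySem.Str.endswith h ("." ++ "tokopedia.com") = true
          ↔ ('.' :: "tokopedia.com".toList) <:+ h.toList := by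
        rw [PySem.Str.endswith_eq]
        rw [PySem.Chars.endswith_iff]
        have : ("." ++ "tokopedia.com" : String).toList = '.' :: "tokopedia.com".toList := by decide
        rw [this]
      have he2 : PySem.Str.endswith h ("." ++ "tokopedia.co.id") = true
          ↔ ('.' :: "tokopedia.co.id".toList) <:+ h.toList := by
        rw [PySem.Str.endswith_eq]
        rw [PySem.Chars.endswith_iff]
        have : ("." ++ "tokopedia.co.id" : String).toList = '.' :: "tokopedia.co.id".toList := by decide
        rw [this]
      rw [he1, he2]
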